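-- pv_equiv track=rewrite | github.com/DanielaBWeiss/QA-ALIGN | crowdsourcing/QASRL/qasrl_processing/transform_qas_for_html.py | transform_apos_in_strings
-- ===== SOURCE A (Python) =====
-- correct_chars = ['[', ']', ' ', ',']
--
-- def transform_apos_in_strings(qa_string):
--     new_qas_string = qa_string
--     index_counter = 0
--
--     for i, char in enumerate(qa_string):
--         if i == 0 or i == len(qa_string) - 1:
--             continue
--
--         if '\'' in char:
--             if qa_string[i - 1] in correct_chars or qa_string[i + 1] in correct_chars:
--                  new_index = index_counter + i
--                  index_counter = index_counter + 1
--                  new_qas_string = new_qas_string[:new_index] + "\\" + new_qas_string[new_index:]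
--
--     new_qas_string = new_qas_string.replace("\\\\", "\\")
--     return new_qas_string
-- ===== SOURCE B (Python) =====
-- correct_chars = ['[', ']', ' ', ',']
--
-- def transform_apos_in_strings(qa_string):
--     # Single forward pass building the output pieces, instead of A's
--     # index-shifted slice-insertions into a growing string.
--     chars = list(qa_string)
--     n = len(chars)
--     out = []
--     for i, ch in enumerate(chars):
--         if ch == "'" and 0 < i < n - 1 and (chars[i - 1] in correct_chars or chars[i + 1] in correct_chars):
--             out.append("\\")
--         out.append(ch)
--     return "".join(out).replace("\\\\", "\\")
-- ===== Notes on version B (the rewrite author's own statement) =====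
-- stated objective: alternative
-- what changed: Replaces A's index-counter scheme of slice-inserting backslashes into a growing copy of the string with a single forward pass that emits each character (prefixed by a backslash when it is a qualifying interior apostrophe) into a list joined once at the end; the final double-backslash collapse is kept.
import Mathlib
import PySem

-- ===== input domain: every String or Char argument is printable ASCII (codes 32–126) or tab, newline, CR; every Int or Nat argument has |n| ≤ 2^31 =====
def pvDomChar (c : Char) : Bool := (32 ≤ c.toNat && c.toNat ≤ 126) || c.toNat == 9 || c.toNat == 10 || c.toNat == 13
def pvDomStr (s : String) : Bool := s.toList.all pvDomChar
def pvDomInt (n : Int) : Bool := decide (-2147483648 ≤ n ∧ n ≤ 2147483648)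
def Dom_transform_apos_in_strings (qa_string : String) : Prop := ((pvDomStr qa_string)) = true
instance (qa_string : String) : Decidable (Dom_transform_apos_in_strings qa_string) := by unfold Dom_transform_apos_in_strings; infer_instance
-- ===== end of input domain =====

-- B replaces A's index-counter slice-insertions into a growing string by a single
-- forward pass that emits each character, preceded by a backslash when it is a
-- qualifying interior apostrophe; same return value, different construction.

-- correct_chars = ['[', ']', ' ', ',']
def pvCorrectChars : List Char := ['[', ']', ' ', ',']

-- ===== PORT A =====
-- A's loop body: skip the first and last index; on an apostrophe whose left or
-- right neighbor in the ORIGINAL string is in correct_chars, slice-insert "\" at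
-- new_index = index_counter + i and bump index_counter.
def pvStepA (s : List Char) (acc : List Char × Int) (p : Int × Char) : List Char × Int :=
  if p.1 == 0 || p.1 == (s.length : Int) - 1 then acc
  else if p.2 == '\'' then  -- `'\'' in char` on a one-character string is equality
    if ((PySem.List.pyGet? s (p.1 - 1)).elim false (pvCorrectChars.contains ·))
        || ((PySem.List.pyGet? s (p.1 + 1)).elim false (pvCorrectChars.contains ·)) then
      let newIndex := acc.2 + p.1
      (PySem.List.slice acc.1 none (some newIndex) ++ ['\\']
         ++ PySem.List.slice acc.1 (some newIndex) none,
       acc.2 + 1)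
    else acc
  else acc

def transform_apos_in_strings (qa_string : String) : String :=
  let s := qa_string.toList
  let st := (PySem.List.enumerate s 0).foldl (pvStepA s) (s, (0 : Int))
  String.ofList (PySem.Chars.replace st.1 ['\\', '\\'] ['\\'])

-- ===== PORT B =====
-- what B appends to `out` for one (i, ch) of enumerate(chars)
def pvEmitB (chars : List Char) (p : Int × Char) : List Char :=
  if (p.2 == '\'') && decide (0 < p.1) && decide (p.1 < (chars.length : Int) - 1)
      && (((PySem.List.pyGet? chars (p.1 - 1)).elim false (pvCorrectChars.contains ·))
          || ((PySem.List.pyGet? chars (p.1 + 1)).elim false (pvCorrectChars.contains ·))) then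
    ['\\'] ++ [p.2]
  else [p.2]

def transform_apos_in_strings_alt (qa_string : String) : String :=
  let chars := qa_string.toList
  let out := (PySem.List.enumerate chars 0).foldl (fun acc p => acc ++ pvEmitB chars p) []
  String.ofList (PySem.Chars.replace out ['\\', '\\'] ['\\'])

-- ===== PRECONDITION & SPEC =====
def Spec_transform_apos_in_strings (qa_string : String) (out : String) : Prop := out = transform_apos_in_strings_alt qa_string
instance (qa_string : String) (out : String) : Decidable (Spec_transform_apos_in_strings qa_string out) := by unfold Spec_transform_apos_in_strings; infer_instance

-- ===== CLAIM (what is proved, stated in full; the proofs are below) =====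
def Claim_equal_transform_apos_in_strings : Prop := ∀ (qa_string : String), Dom_transform_apos_in_strings qa_string → Spec_transform_apos_in_strings qa_string (transform_apos_in_strings qa_string)

-- ===== LEMMAS AND PROOFS =====

-- One step of A's fold, on the invariant state (transformed prefix b0 ++ untouched
-- suffix, index_counter = |b0| - k), equals appending pvEmitB's emission for (k, ch).
lemma pvStepA_eq (s : List Char) (ch : Char) (l' : List Char) (k : Nat) (b0 : List Char)
    (hd : s.drop k = ch :: l') :
    pvStepA s (b0 ++ ch :: l', (b0.length : Int) - k) ((k : Int), ch)
      = ((b0 ++ pvEmitB s ((k : Int), ch)) ++ l',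
         ((b0 ++ pvEmitB s ((k : Int), ch)).length : Int) - ((k : Int) + 1)) := by
  have hklen : k < s.length := by
    have := congrArg List.length hd
    simp [List.length_drop] at this; omega
  simp only [pvStepA, pvEmitB]
  by_cases h0 : k = 0
  · subst h0
    simp [List.append_assoc]
  · by_cases hlast : k = s.length - 1
    · have h1 : ((k : Int) == (s.length : Int) - 1) = true := by
        simp; omega
      have h2 : (decide ((k : Int) < (s.length : Int) - 1)) = false := by
        simp; omega
      simp [h1, h2, List.append_assoc]
    · have h1 : ((k : Int) == (0:Int)) = false := by simp; omega
      have h2 : ((k : Int) == (s.length : Int) - 1) = false := by simp; omega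
      have h3 : (decide ((0:Int) < (k : Int))) = true := by simp; omega
      have h4 : (decide ((k : Int) < (s.length : Int) - 1)) = true := by simp; omega
      simp only [h1, h2, h3, h4, Bool.or_self, Bool.and_true, Bool.true_and]
      by_cases hch : (ch == '\'') = true
      · simp only [hch, Bool.true_and]
        by_cases hc3 : (((PySem.List.pyGet? s ((k:Int) - 1)).elim false (pvCorrectChars.contains ·))
            || ((PySem.List.pyGet? s ((k:Int) + 1)).elim false (pvCorrectChars.contains ·))) = true
        · simp only [hc3, if_true]
          have hidx : (b0.length : Int) - (k:Int) + (k:Int) = (b0.length : Int) := by ring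
          rw [hidx]
          rw [PySem.List.slice_to_natCast, PySem.List.slice_from_natCast]
          rw [List.take_left, List.drop_left]
          simp [List.append_assoc]
          omega
        · simp only [hc3, if_false]
          simp [List.append_assoc]
      · simp only [hch, Bool.false_and]
        simp [List.append_assoc]

-- A's fold invariant: after processing enumerate of the suffix s.drop k starting
-- from state (b0 ++ s.drop k, |b0| - k), the string is b0 followed by B's emissions
-- and index_counter is the number of inserted backslashes.
lemma pvInvA (s : List Char) : ∀ (l : List Char) (k : Nat) (b0 : List Char),
    s.drop k = l →
    (PySem.List.enumerate l (k : Int)).foldl (pvStepA s) (b0 ++ l, (b0.length : Int) - k)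
      = (b0 ++ (PySem.List.enumerate l (k : Int)).flatMap (pvEmitB s),
         ((b0.length : Int) + ((PySem.List.enumerate l (k : Int)).flatMap (pvEmitB s)).length)
           - ((k : Int) + l.length)) := by
  intro l
  induction l with
  | nil =>
    intro k b0 _
    simp [PySem.List.enumerate_nil]
  | cons ch l' ih =>
    intro k b0 hd
    have hd' : s.drop (k + 1) = l' := by
      have h1 : s.drop (k + 1) = (s.drop k).tail := by
        rw [← List.tail_drop]
      rw [h1, hd]
      rfl
    rw [PySem.List.enumerate_cons, List.foldl_cons, List.flatMap_cons]
    rw [pvStepA_eq s ch l' k b0 hd]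
    have hcast : ((k : Int) + 1) = (((k + 1 : Nat) : Int)) := by push_cast; ring
    rw [hcast]
    rw [ih (k + 1) (b0 ++ pvEmitB s ((k : Int), ch)) hd']
    simp only [Prod.mk.injEq]
    constructor <;> simp [List.append_assoc] <;> push_cast <;> ring

-- ===== VERDICT (by name: the statement is the Claim_ definition above) =====
theorem transform_apos_in_strings_spec : Claim_equal_transform_apos_in_strings := by
  intro qa _
  have h := pvInvA qa.toList qa.toList 0 [] (by simp)
  simp only [List.nil_append, Nat.cast_zero, List.length_nil] at h
  rw [show ((0:Int) - 0) = 0 by ring] at h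
  simp only [Spec_transform_apos_in_strings, transform_apos_in_strings,
    transform_apos_in_strings_alt, PySem.List.foldl_append_eq_flatMap, List.nil_append, h]
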